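-- pv_equiv track=rewrite | github.com/AnwarAsif/Data_Science_projects | 4. DPLL Sukoku Solver/utility.py | cnf_conversion
-- ===== SOURCE A (Python) =====
-- def cnf_conversion(puzzle, dim):
--     premises = []
--     row = 1
--     col = 1
--     for i in range(len(puzzle)):
--         if col == dim + 1:
--             col = 1
--             row += 1
--         result = ''
--         if puzzle[i] != '.':
--             value = puzzle[i]
--             result = result + str(row)+str(col)+str(value)
--             premises.append([int(result)])
--         col += 1
--
--     return premises
-- ===== SOURCE B (Python) =====
-- def cnf_conversion(puzzle, dim):
--     # Stage 1: rebuild the board as a list of row strings.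
--     rows = [puzzle[start:start + dim] for start in range(0, len(puzzle), dim)]
--     # Stage 2: scan each row, emitting a unit clause per clue.
--     premises = []
--     for r, row in enumerate(rows, start=1):
--         for c, ch in enumerate(row, start=1):
--             if ch != '.':
--                 premises.append([int(str(r) + str(c) + ch)])
--     return premises
-- ===== Notes on version B (the rewrite author's own statement) =====
-- stated objective: alternative
-- what changed: Replaces A's single pass with cross-iteration row/col counters and a wrap-around reset branch by a two-stage reconstruction: first slice the puzzle string into a list of row strings (one slice per range(0, len, dim) start), then scan each row with nested enumerations emitting a unit clause per clue, keeping the exact string concatenation for the literal.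
-- outside the precondition, e.g. on cnf_conversion('1', 0): A returns [[211]], B raises ValueError; on cnf_conversion('1', -2): A returns [[111]], B returns []
import Mathlib
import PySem

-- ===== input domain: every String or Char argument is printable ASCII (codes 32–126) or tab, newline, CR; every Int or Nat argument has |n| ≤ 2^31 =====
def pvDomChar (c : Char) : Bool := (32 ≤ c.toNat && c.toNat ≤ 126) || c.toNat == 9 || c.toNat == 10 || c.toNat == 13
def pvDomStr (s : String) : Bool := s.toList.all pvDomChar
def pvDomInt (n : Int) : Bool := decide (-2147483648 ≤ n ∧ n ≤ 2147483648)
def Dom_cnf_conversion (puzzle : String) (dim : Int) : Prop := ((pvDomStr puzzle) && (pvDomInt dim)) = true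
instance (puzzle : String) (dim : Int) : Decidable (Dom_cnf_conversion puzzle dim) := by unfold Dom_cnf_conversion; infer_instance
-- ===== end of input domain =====

-- B rebuilds the board in two stages — slice the puzzle into a list of row strings, then scan
-- each row with nested enumerations — instead of A's single pass threading row/col counters
-- with a wrap-around reset branch (objective: alternative, same O(n) cost).

-- ===== PORT A =====
-- literal port of A: fold over range(len(puzzle)) carrying state (premises, row, col);
-- puzzle[i] → pyGetD (i is always in range here); int(result) → (ofStr? result).getD 0
-- (the .getD 0 is never reached inside Pre_, where every clue character is a digit)
def cnf_conversion (puzzle : String) (dim : Int) : List (List Int) :=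
  ((PySem.List.pyRange 0 (PySem.List.len puzzle.toList) 1).foldl
    (fun (st : List (List Int) × Int × Int) i =>
      let premises := st.1
      let rc := if st.2.2 = dim + 1 then (st.2.1 + 1, (1 : Int)) else (st.2.1, st.2.2)
      let row := rc.1
      let col := rc.2
      let c := PySem.List.pyGetD puzzle.toList i ' '
      let premises :=
        if c ≠ '.' then
          premises ++ [[(PySem.Int.ofStr? ("" ++ PySem.Int.toStr row ++ PySem.Int.toStr col ++ String.singleton c)).getD 0]]
        else premises
      (premises, row, col + 1))
    ([], 1, 1)).1

-- ===== PORT B =====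
-- literal port of B: rows = [puzzle[start:start+dim] for start in range(0, len(puzzle), dim)],
-- then nested loops 'for r, row in enumerate(rows, 1): for c, ch in enumerate(row, 1): …'
-- appending [int(str(r) + str(c) + ch)]; int(…) → (ofStr? …).getD 0 as in port A
def cnf_conversion_alt (puzzle : String) (dim : Int) : List (List Int) :=
  let cs := puzzle.toList
  let rows := (PySem.List.pyRange 0 (PySem.List.len cs) dim).map
      (fun start => PySem.List.slice cs (some start) (some (start + dim)))
  (PySem.List.enumerate rows 1).foldl
    (fun premises rr =>
      (PySem.List.enumerate rr.2 1).foldl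
        (fun premises cc =>
          if cc.2 ≠ '.' then
            premises ++ [[(PySem.Int.ofStr? (PySem.Int.toStr rr.1 ++ PySem.Int.toStr cc.1 ++ String.singleton cc.2)).getD 0]]
          else premises)
        premises)
    []

-- ===== PRECONDITION & SPEC =====
-- Pre_ excludes (a) puzzles with a non-digit clue character, on which both programs raise
-- ValueError in int(), and (b) dim ≤ 0 together with anything but an all-dot puzzle with
-- dim < 0 — not a meaningful board dimension — where A's never/always-resetting counters
-- return accidental positions while B's range(0, len, dim) raises ValueError (dim = 0) or
-- produces no rows at all (dim < 0 with clues present).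
def Pre_cnf_conversion (puzzle : String) (dim : Int) : Prop :=
  puzzle.toList.all (fun c => c == '.' || c.isDigit) = true ∧
  (1 ≤ dim ∨ (puzzle.toList.all (fun c => c == '.') = true ∧ dim < 0))
instance (puzzle : String) (dim : Int) : Decidable (Pre_cnf_conversion puzzle dim) := by
  unfold Pre_cnf_conversion; infer_instance

def pvWitness_cnf_conversion : String × Int := ("12..34", 3)

def Spec_cnf_conversion (puzzle : String) (dim : Int) (out : List (List Int)) : Prop := out = cnf_conversion_alt puzzle dim
instance (puzzle : String) (dim : Int) (out : List (List Int)) : Decidable (Spec_cnf_conversion puzzle dim out) := by unfold Spec_cnf_conversion; infer_instance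

-- ===== CLAIM (what is proved, stated in full; the proofs are below) =====
def Claim_equal_cnf_conversion : Prop := ∀ (puzzle : String) (dim : Int), Dom_cnf_conversion puzzle dim → Pre_cnf_conversion puzzle dim → Spec_cnf_conversion puzzle dim (cnf_conversion puzzle dim)

-- ===== LEMMAS AND PROOFS =====

-- the unit clause for a clue ch at 1-based position (row, col)
def cnfClause (row col : Int) (ch : Char) : List Int :=
  [(PySem.Int.ofStr? (PySem.Int.toStr row ++ PySem.Int.toStr col ++ String.singleton ch)).getD 0]

-- A's loop body as a function of the current character (proof-side abbreviation)
def cnfAStep (dim : Int) (st : List (List Int) × Int × Int) (c : Char) : List (List Int) × Int × Int :=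
  let premises := st.1
  let rc := if st.2.2 = dim + 1 then (st.2.1 + 1, (1 : Int)) else (st.2.1, st.2.2)
  let row := rc.1
  let col := rc.2
  let premises :=
    if c ≠ '.' then premises ++ [cnfClause row col c] else premises
  (premises, row, col + 1)

-- the clause(s) contributed by the cell of absolute index i, position read off by div/mod
def cnfFlat (dim : Int) (p : Int × Char) : List (List Int) :=
  if p.2 ≠ '.' then [cnfClause (p.1 / dim + 1) (p.1 % dim + 1) p.2] else []

-- the clauses contributed by one reconstructed row
def cnfRow (r : Int) (row : List Char) : List (List Int) :=
  (PySem.List.enumerate row 1).flatMap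
    (fun cc => if cc.2 ≠ '.' then [cnfClause r cc.1 cc.2] else [])

-- B's stage-1 list of rows
def cnfRows (cs : List Char) (dim : Int) : List (List Char) :=
  (PySem.List.pyRange 0 (PySem.List.len cs) dim).map
    (fun start => PySem.List.slice cs (some start) (some (start + dim)))

theorem cnfA_eq_foldl (puzzle : String) (dim : Int) :
    cnf_conversion puzzle dim = (puzzle.toList.foldl (cnfAStep dim) ([], 1, 1)).1 := by
  unfold cnf_conversion
  exact congrArg Prod.fst
    (PySem.List.foldl_pyRange_zero_pyGetD puzzle.toList ' ' (cnfAStep dim) ([], 1, 1))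

theorem cnfB_eq_flatMap (puzzle : String) (dim : Int) :
    cnf_conversion_alt puzzle dim
      = (PySem.List.enumerate (cnfRows puzzle.toList dim) 1).flatMap
          (fun rr => cnfRow rr.1 rr.2) := by
  unfold cnf_conversion_alt cnfRows
  have hinner : ∀ (r : Int) (row : List Char) (acc : List (List Int)),
      (PySem.List.enumerate row 1).foldl
        (fun premises cc =>
          if cc.2 ≠ '.' then
            premises ++ [[(PySem.Int.ofStr? (PySem.Int.toStr r ++ PySem.Int.toStr cc.1 ++ String.singleton cc.2)).getD 0]]
          else premises) acc
        = acc ++ cnfRow r row := by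
    intro r row acc
    have hfun : (fun (premises : List (List Int)) (cc : Int × Char) =>
        if cc.2 ≠ '.' then
          premises ++ [[(PySem.Int.ofStr? (PySem.Int.toStr r ++ PySem.Int.toStr cc.1 ++ String.singleton cc.2)).getD 0]]
        else premises)
        = (fun premises cc => premises ++ (if cc.2 ≠ '.' then [cnfClause r cc.1 cc.2] else [])) := by
      funext premises cc; split <;> simp [cnfClause]
    rw [hfun, PySem.List.foldl_append_eq_flatMap]
    rfl
  have houter : (fun (premises : List (List Int)) (rr : Int × List Char) =>
      (PySem.List.enumerate rr.2 1).foldl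
        (fun premises cc =>
          if cc.2 ≠ '.' then
            premises ++ [[(PySem.Int.ofStr? (PySem.Int.toStr rr.1 ++ PySem.Int.toStr cc.1 ++ String.singleton cc.2)).getD 0]]
          else premises) premises)
      = (fun premises rr => premises ++ cnfRow rr.1 rr.2) := by
    funext premises rr; exact hinner rr.1 rr.2 premises
  rw [houter, PySem.List.foldl_append_eq_flatMap]
  rfl

-- advancing one cell: the (row, col) pair after A's reset, expressed from the index
theorem step_div_mod (dim : Int) (hdim : 1 ≤ dim) (i : Int) :
    (if i % dim + 1 + 1 = dim + 1 then (i / dim + 1 + 1, (1 : Int)) else (i / dim + 1, i % dim + 1 + 1))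
      = ((i + 1) / dim + 1, (i + 1) % dim + 1) := by
  have hdim0 : dim ≠ 0 := by omega
  have hr0 : 0 ≤ i % dim := Int.emod_nonneg i hdim0
  have hr1 : i % dim < dim := Int.emod_lt_of_pos i (by omega)
  have hqr : dim * (i / dim) + i % dim = i := Int.mul_ediv_add_emod i dim
  by_cases h : i % dim + 1 = dim
  · have hsucc : i + 1 = dim * (i / dim + 1) := by nlinarith [hqr]
    have hq : (i + 1) / dim = i / dim + 1 := by
      rw [hsucc, Int.mul_ediv_cancel_left _ hdim0]
    have hr : (i + 1) % dim = 0 := by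
      rw [hsucc, Int.mul_emod_right]
    simp [h, hq, hr]
  · have hlt : i % dim + 1 < dim := by omega
    have hsucc : i + 1 = (i % dim + 1) + (i / dim) * dim := by nlinarith [hqr]
    have hq : (i + 1) / dim = i / dim := by
      rw [hsucc, Int.add_mul_ediv_right _ _ hdim0, Int.ediv_eq_zero_of_lt (by omega) hlt]
      ring
    have hr : (i + 1) % dim = i % dim + 1 := by
      rw [hsucc, Int.add_mul_emod_self_right _ _ _, Int.emod_eq_of_lt (by omega) hlt]
    have hne : ¬ (i % dim + 1 + 1 = dim + 1) := by omega
    simp [hne, hq, hr]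

-- main A-side invariant: A's pre-reset state entering cell i resets to (i/dim+1, i%dim+1)
theorem loopA_flat (dim : Int) (hdim : 1 ≤ dim) :
    ∀ (cs : List Char) (i : Nat) (row col : Int) (acc : List (List Int)),
      (if col = dim + 1 then (row + 1, (1 : Int)) else (row, col))
        = ((i : Int) / dim + 1, (i : Int) % dim + 1) →
      (cs.foldl (cnfAStep dim) (acc, row, col)).1
        = acc ++ (PySem.List.enumerate cs (i : Int)).flatMap (cnfFlat dim) := by
  intro cs
  induction cs with
  | nil => intro i row col acc h; simp [PySem.List.enumerate_nil]
  | cons c rest ih =>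
    intro i row col acc h
    rw [PySem.List.enumerate_cons]
    simp only [List.foldl_cons, List.flatMap_cons]
    have hstep := step_div_mod dim hdim (i : Int)
    have hacc : (cnfAStep dim (acc, row, col) c).1 = acc ++ cnfFlat dim ((i : Int), c) := by
      simp only [cnfAStep, cnfFlat, h]
      by_cases hc : c = '.' <;> simp [hc]
    have hstate : cnfAStep dim (acc, row, col) c
        = (acc ++ cnfFlat dim ((i : Int), c), (i : Int) / dim + 1, (i : Int) % dim + 1 + 1) := by
      have : cnfAStep dim (acc, row, col) c
          = ((cnfAStep dim (acc, row, col) c).1, (i : Int) / dim + 1, (i : Int) % dim + 1 + 1) := by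
        simp only [cnfAStep, h]
      rw [this, hacc]
    rw [hstate]
    have hcast : ((i : Int) + 1) = ((i + 1 : Nat) : Int) := by push_cast; ring
    rw [ih (i + 1) ((i : Int) / dim + 1) ((i : Int) % dim + 1 + 1)
          (acc ++ cnfFlat dim ((i : Int), c)) (by rw [← hcast]; exact hstep)]
    rw [hcast, List.append_assoc]

-- empty / negative ranges
theorem pyRange_nonpos (d n : Int) (hd : 0 < d) (hn : n ≤ 0) :
    PySem.List.pyRange 0 n d = [] := by
  rw [PySem.List.pyRange_of_pos 0 n hd]
  have : ¬ ((0 : Int) < n) := by omega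
  simp [this]

theorem pyRange_neg (d n : Int) (hd : d < 0) (hn : 0 ≤ n) :
    PySem.List.pyRange 0 n d = [] := by
  have hd0 : d ≠ 0 := by omega
  have h1 : ¬ ((0 : Int) < d) := by omega
  have h2 : ¬ (n < (0 : Int)) := by omega
  simp [PySem.List.pyRange, hd0, h1, h2]

-- peeling one row off range(0, n, d) for 0 < d, 0 < n
theorem pyRange_pos_shift (d n : Int) (hd : 0 < d) (hn : 0 < n) :
    PySem.List.pyRange 0 n d = 0 :: (PySem.List.pyRange 0 (n - d) d).map (· + d) := by
  rw [PySem.List.pyRange_of_pos 0 n hd, PySem.List.pyRange_of_pos 0 (n - d) hd]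
  have hd0 : d ≠ 0 := by omega
  by_cases h : 0 < n - d
  · have hcount : ((n - 0 + d - 1) / d).toNat = ((n - d - 0 + d - 1) / d).toNat + 1 := by
      have : n - 0 + d - 1 = (n - d - 0 + d - 1) + 1 * d := by ring
      rw [this, Int.add_mul_ediv_right _ _ hd0]
      have h0 : 0 ≤ (n - d - 0 + d - 1) / d := by
        apply Int.ediv_nonneg (by omega) (by omega)
      omega
    rw [if_pos hn, if_pos h, hcount, List.range_succ_eq_map]
    simp only [List.map_cons, List.map_map]
    refine congrArg₂ List.cons (by push_cast; ring) ?_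
    apply List.map_congr_left
    intro k _
    simp only [Function.comp_apply]
    push_cast
    ring
  · have hle : n ≤ d := by omega
    have hcount : ((n - 0 + d - 1) / d).toNat = 1 := by
      have h1 : (n - 0 + d - 1) / d = 1 := by
        have : n - 0 + d - 1 = (n - 1) + 1 * d := by ring
        rw [this, Int.add_mul_ediv_right _ _ hd0, Int.ediv_eq_zero_of_lt (by omega) (by omega)]
        ring
      rw [h1]; rfl
    rw [if_pos hn, if_neg h, hcount]
    simp

-- one step of B's row reconstruction
theorem cnfRows_cons (cs : List Char) (dim : Int) (hd : 1 ≤ dim) (hne : cs ≠ []) :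
    cnfRows cs dim = cs.take dim.toNat :: cnfRows (cs.drop dim.toNat) dim := by
  unfold cnfRows
  have hlp : 0 < cs.length := List.length_pos_iff.2 hne
  have hlen : (0 : Int) < PySem.List.len cs := by
    simp [PySem.List.len_eq]; omega
  rw [pyRange_pos_shift dim _ (by omega) hlen]
  simp only [List.map_cons, List.map_map]
  refine congrArg₂ List.cons ?_ ?_
  · rw [zero_add, PySem.List.slice_zero_start, PySem.List.slice_to cs (by omega : (0:Int) ≤ dim)]
  · have hran : PySem.List.pyRange 0 (PySem.List.len cs - dim) dim
        = PySem.List.pyRange 0 (PySem.List.len (cs.drop dim.toNat)) dim := by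
      by_cases hle : dim ≤ (cs.length : Int)
      · congr 1
        simp [PySem.List.len_eq]
        omega
      · rw [pyRange_nonpos dim _ (by omega) (by simp [PySem.List.len_eq]; omega),
            pyRange_nonpos dim _ (by omega) (by simp [PySem.List.len_eq]; omega)]
    rw [hran]
    apply List.map_congr_left
    intro s hs
    have hs0 : 0 ≤ s := by
      rcases (PySem.List.mem_pyRange_iff_of_pos (by omega : (0:Int) < dim) s).1 hs with ⟨h1, _, _⟩
      exact h1
    simp only [Function.comp_apply]
    have e1 : PySem.List.slice cs (some (s + dim)) (some (s + dim + dim))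
        = (cs.drop (s + dim).toNat).take ((s + dim + dim).toNat - (s + dim).toNat) := by
      rw [PySem.List.slice_toNat cs (by omega) (by omega)]
    have e2 : PySem.List.slice (cs.drop dim.toNat) (some s) (some (s + dim))
        = ((cs.drop dim.toNat).drop s.toNat).take ((s + dim).toNat - s.toNat) := by
      rw [PySem.List.slice_toNat _ (by omega) (by omega)]
    rw [e1, e2, List.drop_drop]
    rw [show (s + dim).toNat = dim.toNat + s.toNat by omega]
    congr 1
    omega

-- one row of B agrees with the flat div/mod clauses at aligned indices
theorem row_agree (dim : Int) (hd : 1 ≤ dim) (r : Int) :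
    ∀ (xs : List Char) (j : Nat), (j : Int) + xs.length ≤ dim →
      (PySem.List.enumerate xs (1 + (j : Int))).flatMap
          (fun cc => if cc.2 ≠ '.' then [cnfClause r cc.1 cc.2] else [])
        = (PySem.List.enumerate xs ((r - 1) * dim + (j : Int))).flatMap (cnfFlat dim) := by
  intro xs
  induction xs with
  | nil => intro j h; simp [PySem.List.enumerate_nil]
  | cons c rest ih =>
    intro j h
    rw [PySem.List.enumerate_cons, PySem.List.enumerate_cons]
    simp only [List.flatMap_cons]
    have hd0 : dim ≠ 0 := by omega
    have hjlt : (j : Int) < dim := by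
      have : (0 : Int) ≤ rest.length := by positivity
      simp only [List.length_cons] at h
      push_cast at h
      omega
    have hdiv : ((r - 1) * dim + (j : Int)) / dim = r - 1 := by
      rw [add_comm, Int.add_mul_ediv_right _ _ hd0,
          Int.ediv_eq_zero_of_lt (by omega) hjlt]
      ring
    have hmod : ((r - 1) * dim + (j : Int)) % dim = (j : Int) := by
      rw [add_comm, Int.add_mul_emod_self_right,
          Int.emod_eq_of_lt (by omega) hjlt]
    have hhead : (if c ≠ '.' then [cnfClause r (1 + (j : Int)) c] else ([] : List (List Int)))
        = cnfFlat dim ((r - 1) * dim + (j : Int), c) := by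
      simp only [cnfFlat, hdiv, hmod]
      rw [show r - 1 + 1 = r by ring, show (j : Int) + 1 = 1 + (j : Int) by ring]
    rw [hhead]
    congr 1
    have h1 : (1 : Int) + (j : Int) + 1 = 1 + ((j + 1 : Nat) : Int) := by push_cast; ring
    have h2 : (r - 1) * dim + (j : Int) + 1 = (r - 1) * dim + ((j + 1 : Nat) : Int) := by
      push_cast; ring
    rw [h1, h2]
    apply ih
    simp only [List.length_cons] at h
    push_cast at h ⊢
    omega

-- main B-side lemma: the chunked scan equals the flat div/mod scan (fuel = length bound)
theorem rows_flat (dim : Int) (hd : 1 ≤ dim) :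
    ∀ (n : Nat) (cs : List Char), cs.length ≤ n → ∀ (r : Int),
      (PySem.List.enumerate (cnfRows cs dim) r).flatMap (fun rr => cnfRow rr.1 rr.2)
        = (PySem.List.enumerate cs ((r - 1) * dim)).flatMap (cnfFlat dim) := by
  intro n
  induction n with
  | zero =>
    intro cs hcs r
    have : cs = [] := List.length_eq_zero_iff.1 (by omega)
    subst this
    simp [cnfRows, pyRange_nonpos dim 0 (by omega) (by omega), PySem.List.enumerate_nil]
  | succ m ih =>
    intro cs hcs r
    by_cases hne : cs = []
    · subst hne
      simp [cnfRows, pyRange_nonpos dim 0 (by omega) (by omega), PySem.List.enumerate_nil]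
    · rw [cnfRows_cons cs dim hd hne, PySem.List.enumerate_cons]
      simp only [List.flatMap_cons]
      have hrow : cnfRow r (cs.take dim.toNat)
          = (PySem.List.enumerate (cs.take dim.toNat) ((r - 1) * dim)).flatMap (cnfFlat dim) := by
        unfold cnfRow
        have := row_agree dim hd r (cs.take dim.toNat) 0
          (by simp; omega)
        simpa using this
      have hdrop : (cs.drop dim.toNat).length ≤ m := by
        have hpos : 0 < dim.toNat := by omega
        have hlen : 0 < cs.length := List.length_pos_iff.2 hne
        simp [List.length_drop]
        omega
      have htail := ih (cs.drop dim.toNat) hdrop (r + 1)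
      have hsplit : cs = cs.take dim.toNat ++ cs.drop dim.toNat :=
        (List.take_append_drop _ _).symm
      rw [hrow, htail]
      conv_rhs => rw [hsplit]
      rw [PySem.List.enumerate_append, List.flatMap_append]
      congr 2
      by_cases hle : cs.length ≤ dim.toNat
      · have h1 : cs.drop dim.toNat = [] := by
          apply List.drop_eq_nil_of_le; omega
        rw [h1]
        simp [PySem.List.enumerate_nil]
      · have h1 : (cs.take dim.toNat).length = dim.toNat := by
          simp; omega
        rw [h1]
        congr 1
        have : (dim.toNat : Int) = dim := by omega
        rw [this]; ring

-- all-dots puzzles: A's loop appends nothing, for every dim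
theorem loopA_dots (dim : Int) :
    ∀ (cs : List Char), cs.all (fun c => c == '.') = true →
      ∀ (row col : Int) (acc : List (List Int)),
        (cs.foldl (cnfAStep dim) (acc, row, col)).1 = acc := by
  intro cs
  induction cs with
  | nil => intro _ row col acc; simp
  | cons c rest ih =>
    intro hall row col acc
    simp only [List.all_cons, Bool.and_eq_true, beq_iff_eq] at hall
    simp only [List.foldl_cons]
    have : cnfAStep dim (acc, row, col) c
        = (acc, (if col = dim + 1 then (row + 1, (1:Int)) else (row, col)).1,
               (if col = dim + 1 then (row + 1, (1:Int)) else (row, col)).2 + 1) := by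
      simp [cnfAStep, hall.1]
    rw [this, ih hall.2]

-- ===== VERDICT (by name: the statement is the Claim_ definition above) =====
theorem cnf_conversion_spec : Claim_equal_cnf_conversion := by
  intro puzzle dim _hdom hpre
  unfold Spec_cnf_conversion
  rcases hpre.2 with hdim | ⟨hdots, hneg⟩
  · rw [cnfA_eq_foldl, cnfB_eq_flatMap]
    have hA := loopA_flat dim hdim puzzle.toList 0 1 1 [] (by
      have h1 : (1 : Int) ≠ dim + 1 := by omega
      simp [h1])
    have hB := rows_flat dim hdim puzzle.toList.length puzzle.toList (le_refl _) 1
    rw [hA, hB]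
    norm_num
  · rw [cnfA_eq_foldl, cnfB_eq_flatMap]
    rw [loopA_dots dim puzzle.toList hdots 1 1 []]
    have hrows : cnfRows puzzle.toList dim = [] := by
      unfold cnfRows
      rw [pyRange_neg dim _ hneg (by simp [PySem.List.len_eq])]
      simp
    rw [hrows]
    simp [PySem.List.enumerate_nil]
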